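-- pv_equiv track=rewrite | github.com/CollinsVieira/Calidad_de_Software_RP | Casos/sopa_de_letras.py | validar_palabras
-- ===== SOURCE A (Python) =====
-- def contiene_caracteres_especiales(palabra):
--     caracteres_especiales = {'{', '}', '[', ']', '@', ',', '.', '#', '$', '%', '^', '&', '*', '(', ')'}
--     return any(char in caracteres_especiales for char in palabra)
--
-- def contiene_numeros(palabra):
--     return any(char.isdigit() for char in palabra)
--
-- def validar_palabras(n, palabras):
--     for palabra in palabras:
--         if len(palabra) > n:
--             return False
--         if contiene_numeros(palabra):
--             return False
--         if contiene_caracteres_especiales(palabra):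
--             return False
--     return True
-- ===== SOURCE B (Python) =====
-- def validar_palabras(n, palabras):
--     # Stage 1: one aggregate length check via max, no per-word early return.
--     if palabras and max(len(p) for p in palabras) > n:
--         return False
--     # Stage 2: pool all distinct characters of every word into one set,
--     # then decide by set intersection / one pass over the (deduplicated) pool.
--     letras = set(''.join(palabras))
--     if letras & set('{}[]@,.#$%^&*()'):
--         return False
--     return not any(c.isdigit() for c in letras)
-- ===== Notes on version B (the rewrite author's own statement) =====
-- stated objective: faster
-- what changed: Replaced A's per-word early-return loop with two helper scans per word by a staged global computation: one aggregate max() over all lengths, then one deduplicated character pool set(''.join(palabras)) decided by a set intersection with the punctuation set and a single digit pass over the pool; correct because the Boolean result only depends on whether any word is too long or any character anywhere is forbidden.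
import Mathlib
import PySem

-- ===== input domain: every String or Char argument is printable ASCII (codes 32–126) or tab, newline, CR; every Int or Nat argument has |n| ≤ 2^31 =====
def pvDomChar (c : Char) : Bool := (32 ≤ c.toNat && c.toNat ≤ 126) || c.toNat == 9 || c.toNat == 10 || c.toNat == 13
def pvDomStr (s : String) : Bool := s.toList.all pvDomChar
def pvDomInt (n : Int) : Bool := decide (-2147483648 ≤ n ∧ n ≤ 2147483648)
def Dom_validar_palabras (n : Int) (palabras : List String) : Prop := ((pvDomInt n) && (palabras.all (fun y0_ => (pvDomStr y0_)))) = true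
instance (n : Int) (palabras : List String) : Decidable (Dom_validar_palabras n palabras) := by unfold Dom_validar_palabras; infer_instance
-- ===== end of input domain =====

-- B replaces A's per-word early-return loop (two helper scans per word) by staged global
-- aggregates: a max() over all lengths, then one deduplicated character pool queried by set
-- intersection and a single digit pass; objective: faster (measured constant-factor speedup).

-- ===== PORT A =====
def contiene_caracteres_especiales (palabra : String) : Bool :=
  palabra.toList.any (fun char =>
    PySem.Set.contains (PySem.Set.ofList ['{', '}', '[', ']', '@', ',', '.', '#', '$', '%', '^', '&', '*', '(', ')']) char)

def contiene_numeros (palabra : String) : Bool :=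
  palabra.toList.any (fun char => PySem.Chars.isdigit char)

def validar_palabras (n : Int) (palabras : List String) : Bool :=
  match palabras with
  | [] => true
  | palabra :: rest =>
    if PySem.Str.len palabra > n then false
    else if contiene_numeros palabra then false
    else if contiene_caracteres_especiales palabra then false
    else validar_palabras n rest

-- ===== PORT B =====
def validar_palabras_alt (n : Int) (palabras : List String) : Bool :=
  -- if palabras and max(len(p) for p in palabras) > n: return False
  if (!palabras.isEmpty) &&
      (match PySem.List.max? (palabras.map (fun p => PySem.Str.len p)) (fun x => x) with
       | some m => decide (m > n)
       | none => false) then false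
  else
    -- letras = set(''.join(palabras))   (the characters of the joined string; written out inline)
    -- if letras & set('{}[]@,.#$%^&*()'): return False   (truthiness = nonempty)
    if !(PySem.Set.inter (PySem.Set.ofList (palabras.flatMap String.toList)) (PySem.Set.ofList "{}[]@,.#$%^&*()".toList)).isEmpty then false
    else !((PySem.Set.ofList (palabras.flatMap String.toList)).any (fun c => PySem.Chars.isdigit c))

-- ===== PRECONDITION & SPEC =====
def Spec_validar_palabras (n : Int) (palabras : List String) (out : Bool) : Prop := out = validar_palabras_alt n palabras
instance (n : Int) (palabras : List String) (out : Bool) : Decidable (Spec_validar_palabras n palabras out) := by unfold Spec_validar_palabras; infer_instance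

-- ===== CLAIM (what is proved, stated in full; the proofs are below) =====
def Claim_equal_validar_palabras : Prop := ∀ (n : Int) (palabras : List String), Dom_validar_palabras n palabras → Spec_validar_palabras n palabras (validar_palabras n palabras)

-- ===== LEMMAS AND PROOFS =====

-- the good-word property A checks word by word
def pvGood (n : Int) (p : String) : Prop :=
  PySem.Str.len p ≤ n ∧ contiene_numeros p = false ∧ contiene_caracteres_especiales p = false

theorem pvA_true (n : Int) (ps : List String) :
    validar_palabras n ps = true ↔ ∀ p ∈ ps, pvGood n p := by
  induction ps with
  | nil => simp [validar_palabras]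
  | cons p rest ih =>
    rw [validar_palabras]
    split_ifs with h1 h2 h3
    · simp only [false_iff]; intro h; have := (h p (by simp)).1; omega
    · simp only [false_iff]; intro h; exact absurd (h p (by simp)).2.1 (by simp [h2])
    · simp only [false_iff]; intro h; exact absurd (h p (by simp)).2.2 (by simp [h3])
    · rw [ih]
      constructor
      · intro h q hq
        rcases List.mem_cons.mp hq with rfl | hq'
        · exact ⟨by omega, by simpa using h2, by simpa using h3⟩
        · exact h q hq'
      · intro h q hq
        exact h q (List.mem_cons_of_mem _ hq)

theorem pvB_len (n : Int) (ps : List String) :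
    ((!ps.isEmpty) &&
      (match PySem.List.max? (ps.map (fun p => PySem.Str.len p)) (fun x => x) with
       | some m => decide (m > n)
       | none => false)) = false ↔ ∀ p ∈ ps, PySem.Str.len p ≤ n := by
  cases ps with
  | nil => simp
  | cons p rest =>
    simp only [List.isEmpty_cons, Bool.not_false, Bool.true_and]
    have hne : (p :: rest).map (fun q => PySem.Str.len q) ≠ [] := by simp
    rcases hm : PySem.List.max? ((p :: rest).map (fun q => PySem.Str.len q)) (fun x => x) with _ | m
    · exact absurd ((PySem.List.max?_eq_none_iff _ _).mp hm) hne
    · simp only [decide_eq_false_iff_not, not_lt]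
      constructor
      · intro hle q hq
        have := PySem.List.max?_isMax hm (PySem.Str.len q) (List.mem_map_of_mem hq)
        omega
      · intro h
        have hmem := PySem.List.max?_mem hm
        rcases List.mem_map.mp hmem with ⟨q, hq, hql⟩
        have := h q hq; omega

theorem pvInter_empty (xs L : List Char) :
    (PySem.Set.inter (PySem.Set.ofList xs) (PySem.Set.ofList L)).isEmpty = true ↔
      ∀ c ∈ xs, c ∉ PySem.Set.ofList L := by
  rw [List.isEmpty_iff, List.eq_nil_iff_forall_not_mem]
  constructor
  · intro h c hc hcL
    exact h c ((PySem.Set.mem_inter _ _ _).mpr ⟨(PySem.Set.mem_ofList _ _).mpr hc, hcL⟩)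
  · intro h c hc
    rcases (PySem.Set.mem_inter _ _ _).mp hc with ⟨hc1, hc2⟩
    exact h c ((PySem.Set.mem_ofList _ _).mp hc1) hc2

theorem pvAny_ofList (xs : List Char) (f : Char → Bool) :
    (PySem.Set.ofList xs : List Char).any f = false ↔ ∀ c ∈ xs, f c = false := by
  rw [List.any_eq_false]
  constructor
  · intro h c hc
    exact Bool.eq_false_iff.mpr fun ht => h c ((PySem.Set.mem_ofList _ _).mpr hc) ht
  · intro h c hc ht
    exact absurd ht (by simp [h c ((PySem.Set.mem_ofList _ _).mp hc)])

theorem pvB_true (n : Int) (ps : List String) :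
    validar_palabras_alt n ps = true ↔
      (∀ p ∈ ps, PySem.Str.len p ≤ n) ∧
      (∀ c ∈ ps.flatMap String.toList, c ∉ PySem.Set.ofList "{}[]@,.#$%^&*()".toList) ∧
      (∀ c ∈ ps.flatMap String.toList, PySem.Chars.isdigit c = false) := by
  unfold validar_palabras_alt
  split_ifs with h1 h2
  · constructor
    · intro h; cases h
    · rintro ⟨hlen, _, _⟩
      rw [(pvB_len n ps).mpr hlen] at h1
      cases h1
  · constructor
    · intro h; cases h
    · rintro ⟨_, hsp, _⟩
      rw [(pvInter_empty _ _).mpr hsp] at h2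
      simp at h2
  · have hlen := (pvB_len n ps).mp (Bool.eq_false_iff.mpr h1)
    have hsp := (pvInter_empty (ps.flatMap String.toList) "{}[]@,.#$%^&*()".toList).mp (by
      have := Bool.eq_false_iff.mpr h2
      simpa using this)
    rw [Bool.not_eq_true', pvAny_ofList]
    constructor
    · intro hd; exact ⟨hlen, hsp, hd⟩
    · rintro ⟨_, _, hd⟩; exact hd

theorem pv_main (n : Int) (ps : List String) :
    validar_palabras n ps = validar_palabras_alt n ps := by
  rw [Bool.eq_iff_iff, pvA_true, pvB_true]
  constructor
  · intro h
    refine ⟨fun p hp => (h p hp).1, ?_, ?_⟩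
    · intro c hc hmem
      rcases List.mem_flatMap.mp hc with ⟨p, hp, hcp⟩
      have hno := (h p hp).2.2
      unfold contiene_caracteres_especiales at hno
      rw [List.any_eq_false] at hno
      exact absurd ((PySem.Set.contains_iff _ _).mpr hmem) (by simpa using hno c hcp)
    · intro c hc
      rcases List.mem_flatMap.mp hc with ⟨p, hp, hcp⟩
      have hno := (h p hp).2.1
      unfold contiene_numeros at hno
      rw [List.any_eq_false] at hno
      exact Bool.eq_false_iff.mpr (hno c hcp)
  · rintro ⟨h1, h2, h3⟩ p hp
    refine ⟨h1 p hp, ?_, ?_⟩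
    · unfold contiene_numeros
      rw [List.any_eq_false]
      intro c hc ht
      exact absurd ht (by simp [h3 c (List.mem_flatMap.mpr ⟨p, hp, hc⟩)])
    · unfold contiene_caracteres_especiales
      rw [List.any_eq_false]
      intro c hc ht
      exact h2 c (List.mem_flatMap.mpr ⟨p, hp, hc⟩) ((PySem.Set.contains_iff _ _).mp ht)

-- ===== VERDICT (by name: the statement is the Claim_ definition above) =====
theorem validar_palabras_spec : Claim_equal_validar_palabras := by
  intro n ps _
  unfold Spec_validar_palabras
  exact pv_main n ps
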